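-- pv_equiv track=rewrite | github.com/emx/sage | integrations/levelup/results/20260301_193831_sqli_1.5/challenges/sage_run_32/app.py | waf_filter
-- ===== SOURCE A (Python) =====
-- def waf_filter(input_str):
--     # WAF: Blocks spaces, comments, UNION, OR, and common SQL characters
--     if not input_str:
--         return True
--     blacklist = [' ', '--', ';', 'union', 'or ', ' or', 'waitfor', 'delay', 'sleep', '"', 'load_file']
--     for item in blacklist:
--         if item in input_str.lower():
--             return False
--     return True
-- ===== SOURCE B (Python) =====
-- def waf_filter(input_str):
--     # One left-to-right scan: at each position, test whether any blacklisted
--     # word starts there, instead of one full `in` scan per word.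
--     if not input_str:
--         return True
--     s = input_str.lower()
--     words = [' ', '--', ';', 'union', 'or ', ' or', 'waitfor', 'delay', 'sleep', '"', 'load_file']
--     for i in range(len(s)):
--         for w in words:
--             if s.startswith(w, i):
--                 return False
--     return True
-- ===== Notes on version B (the rewrite author's own statement) =====
-- stated objective: alternative
-- what changed: Replaces the per-word substring-membership loop by a single positional scan of the string that tests, at each index, whether any blacklisted word starts there.
import Mathlib
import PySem

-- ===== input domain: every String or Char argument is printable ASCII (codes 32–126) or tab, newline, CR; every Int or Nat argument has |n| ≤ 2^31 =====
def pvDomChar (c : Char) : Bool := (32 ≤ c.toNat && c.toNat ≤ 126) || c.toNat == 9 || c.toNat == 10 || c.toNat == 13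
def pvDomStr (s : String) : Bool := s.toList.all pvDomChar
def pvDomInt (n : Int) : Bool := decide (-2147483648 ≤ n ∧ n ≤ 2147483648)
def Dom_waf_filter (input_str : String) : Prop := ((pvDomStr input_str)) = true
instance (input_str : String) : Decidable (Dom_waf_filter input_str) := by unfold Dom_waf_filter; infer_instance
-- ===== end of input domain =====

-- B replaces A's per-word `in` substring loop by a single positional scan testing each
-- blacklist word with startswith at every index (objective: alternative, same cost class).

-- ===== PORT A =====
def wafBlacklist : List String :=
  [" ", "--", ";", "union", "or ", " or", "waitfor", "delay", "sleep", "\"", "load_file"]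

-- the 'for item in blacklist' loop with its early return
def wafLoopA (items : List String) (s : String) : Bool :=
  match items with
  | [] => true
  | item :: rest => if PySem.Str.isIn item s then false else wafLoopA rest s

def waf_filter (input_str : String) : Bool :=
  if input_str = "" then true
  else wafLoopA wafBlacklist (PySem.Str.lower input_str)

-- ===== PORT B =====
-- inner 'for w in words' loop: does any word start at this position (t = s[i:])?
def wafHitAt (ws : List String) (t : List Char) : Bool :=
  match ws with
  | [] => false
  | w :: rest => if PySem.Chars.startswith t w.toList then true else wafHitAt rest t

-- outer 'for i in range(len(s))' loop with its early return
def wafScan (s : List Char) (idxs : List Nat) : Bool :=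
  match idxs with
  | [] => true
  | i :: rest => if wafHitAt wafBlacklist (s.drop i) then false else wafScan s rest

def waf_filter_alt (input_str : String) : Bool :=
  if input_str = "" then true
  else
    let s := (PySem.Str.lower input_str).toList
    wafScan s (List.range s.length)

-- ===== PRECONDITION & SPEC =====
def Spec_waf_filter (input_str : String) (out : Bool) : Prop := out = waf_filter_alt input_str
instance (input_str : String) (out : Bool) : Decidable (Spec_waf_filter input_str out) := by unfold Spec_waf_filter; infer_instance

-- ===== CLAIM (what is proved, stated in full; the proofs are below) =====
def Claim_equal_waf_filter : Prop := ∀ (input_str : String), Dom_waf_filter input_str → Spec_waf_filter input_str (waf_filter input_str)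

-- ===== LEMMAS AND PROOFS =====

theorem wafLoopA_eq_true_iff (items : List String) (s : String) :
    wafLoopA items s = true ↔ ∀ item ∈ items, ¬ item.toList <:+: s.toList := by
  induction items with
  | nil => simp [wafLoopA]
  | cons item rest ih =>
    simp only [wafLoopA, PySem.Str.isIn_eq]
    by_cases h : PySem.Chars.isIn item.toList s.toList = true
    · simp [h, (PySem.Chars.isIn_iff_infix _ _).mp h]
    · have h' : ¬ item.toList <:+: s.toList := fun hc => h ((PySem.Chars.isIn_iff_infix _ _).mpr hc)
      simp [h, ih, h']

theorem wafHitAt_eq_true_iff (ws : List String) (t : List Char) :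
    wafHitAt ws t = true ↔ ∃ w ∈ ws, w.toList <+: t := by
  induction ws with
  | nil => simp [wafHitAt]
  | cons w rest ih =>
    simp only [wafHitAt]
    by_cases h : PySem.Chars.startswith t w.toList = true
    · simp [h, (PySem.Chars.startswith_iff _ _).mp h]
    · have h' : ¬ w.toList <+: t := fun hc => h ((PySem.Chars.startswith_iff _ _).mpr hc)
      simp [h, ih, h']

theorem wafScan_eq_true_iff (s : List Char) (idxs : List Nat) :
    wafScan s idxs = true ↔ ∀ i ∈ idxs, wafHitAt wafBlacklist (s.drop i) = false := by
  induction idxs with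
  | nil => simp [wafScan]
  | cons i rest ih =>
    simp only [wafScan]
    by_cases h : wafHitAt wafBlacklist (s.drop i) = true
    · simp [h]
    · simp [h, ih]

theorem wafBlacklist_nonempty : ∀ w ∈ wafBlacklist, w.toList ≠ [] := by decide

-- core: the positional scan finds a hit iff some blacklist word is an infix
theorem wafScan_iff (s : List Char) :
    wafScan s (List.range s.length) = true ↔ ∀ w ∈ wafBlacklist, ¬ w.toList <:+: s := by
  rw [wafScan_eq_true_iff]
  constructor
  · intro h w hw hinf
    have hin : PySem.Chars.isIn w.toList s = true := (PySem.Chars.isIn_iff_infix _ _).mpr hinf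
    obtain ⟨j, hj⟩ := (PySem.Chars.exists_prefix_drop_iff_isIn w.toList s).mpr hin
    have hjlt : j < s.length := by
      by_contra hge
      have : s.drop j = [] := List.drop_eq_nil_of_le (by omega)
      rw [this] at hj
      exact wafBlacklist_nonempty w hw (List.prefix_nil.mp hj)
    have := h j (List.mem_range.mpr hjlt)
    have hhit : wafHitAt wafBlacklist (s.drop j) = true :=
      (wafHitAt_eq_true_iff _ _).mpr ⟨w, hw, hj⟩
    simp [this] at hhit
  · intro h i _
    by_contra hne
    have hhit : wafHitAt wafBlacklist (s.drop i) = true := by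
      cases hb : wafHitAt wafBlacklist (s.drop i) <;> simp_all
    obtain ⟨w, hw, hpre⟩ := (wafHitAt_eq_true_iff _ _).mp hhit
    have hinf : w.toList <:+: s :=
      (PySem.Chars.isIn_iff_infix _ _).mp
        ((PySem.Chars.exists_prefix_drop_iff_isIn w.toList s).mp ⟨i, hpre⟩)
    exact h w hw hinf

theorem waf_eq (input_str : String) : waf_filter input_str = waf_filter_alt input_str := by
  unfold waf_filter waf_filter_alt
  by_cases he : input_str = ""
  · simp [he]
  · simp only [he, if_false]
    have hA := wafLoopA_eq_true_iff wafBlacklist (PySem.Str.lower input_str)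
    have hB := wafScan_iff (PySem.Str.lower input_str).toList
    by_cases hw : wafLoopA wafBlacklist (PySem.Str.lower input_str) = true
    · rw [hw]
      exact (hB.mpr (hA.mp hw)).symm
    · have h1 : wafLoopA wafBlacklist (PySem.Str.lower input_str) = false :=
        Bool.eq_false_iff.mpr hw
      have h2 : wafScan (PySem.Str.lower input_str).toList
          (List.range (PySem.Str.lower input_str).toList.length) = false := by
        cases h : wafScan (PySem.Str.lower input_str).toList
            (List.range (PySem.Str.lower input_str).toList.length)
        · rfl
        · exact absurd (hA.mpr (hB.mp h)) hw
      rw [h1, h2]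

-- ===== VERDICT (by name: the statement is the Claim_ definition above) =====
theorem waf_filter_spec : Claim_equal_waf_filter := by
  intro s _
  unfold Spec_waf_filter
  exact waf_eq s
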